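-- pv_equiv track=rewrite | github.com/mjordanaam/web_scrapping_twitter_telegram_mastodon_bot | text.py | get_stat_by_prefix
-- ===== SOURCE A (Python) =====
-- def get_stat_by_prefix(words: list) -> [str, str]:
-- 	stat = ""
-- 	count = []
-- 	count3 = []
-- 	d = {}
-- 	w = list(words)
--
-- 	for e in w:
-- 		count.append(e[0:2])
-- 		count3.append(e[0:3])
--
-- 	count.sort()
-- 	count3.sort()
--
-- 	for n in count:
-- 		if n not in d.keys():
-- 			d[n] = 1
-- 		else:
-- 			d[n] += 1
--
-- 	aux = list(d.keys())[0][0]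
--
-- 	for key, value in d.items():
-- 		if key[0] == aux:
-- 			stat = stat + "***" + str(key) + " -*** " + str(value) + "  "
-- 		else:
-- 			stat = stat + "\n***" + str(key) + " -*** " + str(value) + "  "
-- 		aux = key[0]
--
-- 	d = {}
--
-- 	for n in count3:
-- 		if n not in d.keys():
-- 			d[n] = 1
-- 		else:
-- 			d[n] += 1
--
-- 	max_key = max(d, key=d.get)
-- 	all_values = d.values()
-- 	max_value = max(all_values)
--
-- 	stat2 = (
-- 		f"\n\n***{max_key} -*** {max_value} paraules\n"
-- 	)
--
-- 	return stat, stat2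
-- ===== SOURCE B (Python) =====
-- def _runs(xs):
-- 	# xs sorted: list of (value, run length) for each maximal run of equal values
-- 	out = []
-- 	i = 0
-- 	n = len(xs)
-- 	while i < n:
-- 		j = i
-- 		while j < n and xs[j] == xs[i]:
-- 			j += 1
-- 		out.append((xs[i], j - i))
-- 		i = j
-- 	return out
--
--
-- def get_stat_by_prefix(words: list) -> [str, str]:
-- 	r2 = _runs(sorted(e[0:2] for e in words))
-- 	r3 = _runs(sorted(e[0:3] for e in words))
--
-- 	prev = r2[0][0][0]
-- 	stat = ""
-- 	for key, cnt in r2: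
-- 		sep = "" if key[0] == prev else "\n"
-- 		stat = stat + f"{sep}***{key} -*** {cnt}  "
-- 		prev = key[0]
--
-- 	best_key, best = r3[0][0], 0
-- 	for key, cnt in r3:
-- 		if cnt > best:
-- 			best_key, best = key, cnt
--
-- 	stat2 = f"\n\n***{best_key} -*** {best} paraules\n"
-- 	return stat, stat2
-- ===== Notes on version B (the rewrite author's own statement) =====
-- stated objective: alternative
-- what changed: B drops A's dictionaries entirely: it run-length-scans the two sorted prefix lists (one pair per maximal run of equal adjacent elements) to get each distinct prefix with its count, and picks the top 3-prefix as the first longest run, instead of A's count-into-dict, max(d, key=d.get) pipeline.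
import Mathlib
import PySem

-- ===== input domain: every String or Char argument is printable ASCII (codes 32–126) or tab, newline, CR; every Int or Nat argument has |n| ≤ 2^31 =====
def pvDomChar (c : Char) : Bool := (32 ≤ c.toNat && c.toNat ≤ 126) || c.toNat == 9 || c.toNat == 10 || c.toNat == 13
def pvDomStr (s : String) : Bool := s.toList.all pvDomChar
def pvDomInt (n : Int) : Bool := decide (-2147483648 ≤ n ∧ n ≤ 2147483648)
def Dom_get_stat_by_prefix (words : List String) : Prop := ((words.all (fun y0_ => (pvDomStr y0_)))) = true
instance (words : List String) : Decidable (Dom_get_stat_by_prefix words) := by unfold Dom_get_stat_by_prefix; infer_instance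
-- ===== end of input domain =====

-- B replaces A's dict-based counting entirely: it run-length-scans the two sorted prefix
-- lists (groups of equal adjacent elements) and picks the top 3-prefix as the first longest
-- run — no dictionaries at all (alternative algorithm, similar cost).

-- ===== PORT A =====
def get_stat_by_prefix (words : List String) : String × String :=
  let stat : String := ""
  let w := words
  let cc := w.foldl (fun (acc : List String × List String) e =>
      (acc.1 ++ [PySem.Str.slice e (some 0) (some 2)],
       acc.2 ++ [PySem.Str.slice e (some 0) (some 3)])) ([], [])
  let count := PySem.List.sorted cc.1 (fun x => x)
  let count3 := PySem.List.sorted cc.2 (fun x => x)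
  let d : PySem.Dict String Int := count.foldl (fun d n =>
      if ¬ (n ∈ d.keys) then d.insert n 1 else d.insert n (d.getD n 0 + 1)) PySem.Dict.empty
  -- list(d.keys())[0][0]: Python raises IndexError when words is empty or the first key is ""; Pre_ excludes those, ' ' is a dead default
  let aux : Char := ((PySem.List.pyGet? d.keys 0).bind (fun k => PySem.Str.pyGet? k 0)).getD ' '
  let sp := d.items.foldl (fun (sa : String × Char) kv =>
      let key := kv.1
      let value := kv.2
      let k0 : Char := (PySem.Str.pyGet? key 0).getD ' '   -- key[0]; "" excluded by Pre_
      if k0 = sa.2 then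
        (sa.1 ++ "***" ++ key ++ " -*** " ++ PySem.Int.toStr value ++ "  ", k0)
      else
        (sa.1 ++ "\n***" ++ key ++ " -*** " ++ PySem.Int.toStr value ++ "  ", k0)) (stat, aux)
  let stat := sp.1
  let d3 : PySem.Dict String Int := count3.foldl (fun d n =>
      if ¬ (n ∈ d.keys) then d.insert n 1 else d.insert n (d.getD n 0 + 1)) PySem.Dict.empty
  -- max(d, key=d.get): first key with maximal value; raises ValueError on empty dict (excluded by Pre_)
  let max_key := (PySem.List.max? d3.keys (fun k => d3.getD k 0)).getD ""
  let max_value := (PySem.List.max? d3.values (fun v => v)).getD 0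
  let stat2 := "\n\n***" ++ max_key ++ " -*** " ++ PySem.Int.toStr max_value ++ " paraules\n"
  (stat, stat2)

-- ===== PORT B =====
-- _runs(xs): the outer while emits one pair per maximal run of equal adjacent elements;
-- the inner while (collect the run, j - i) is takeWhile, the jump i := j is dropWhile (exact).
def pvRuns (xs : List String) : List (String × Int) :=
  match xs with
  | [] => []
  | x :: t =>
      (x, 1 + ((t.takeWhile (fun y => y == x)).length : Int)) ::
        pvRuns (t.dropWhile (fun y => y == x))
termination_by xs.length
decreasing_by
  simp only [List.length_cons]
  exact Nat.lt_succ_of_le (t.length_dropWhile_le _)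

def get_stat_by_prefix_alt (words : List String) : String × String :=
  let r2 := pvRuns (PySem.List.sorted (words.map (fun e => PySem.Str.slice e (some 0) (some 2))) (fun x => x))
  let r3 := pvRuns (PySem.List.sorted (words.map (fun e => PySem.Str.slice e (some 0) (some 3))) (fun x => x))
  -- prev = r2[0][0][0]: IndexError on empty input / empty word, excluded by Pre_; ' ' is a dead default
  let prev : Char := ((PySem.List.pyGet? r2 0).bind (fun kv => PySem.Str.pyGet? kv.1 0)).getD ' '
  let sp := r2.foldl (fun (sa : String × Char) kv =>
      let k0 : Char := (PySem.Str.pyGet? kv.1 0).getD ' '   -- key[0]; "" excluded by Pre_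
      let sep : String := if k0 = sa.2 then "" else "\n"
      (sa.1 ++ (sep ++ "***" ++ kv.1 ++ " -*** " ++ PySem.Int.toStr kv.2 ++ "  "), k0)) ("", prev)
  let stat := sp.1
  let bk0 : String := ((PySem.List.pyGet? r3 0).map (fun kv => kv.1)).getD ""
  let bb := r3.foldl (fun (b : String × Int) kv => if kv.2 > b.2 then (kv.1, kv.2) else b) (bk0, 0)
  let stat2 := "\n\n***" ++ bb.1 ++ " -*** " ++ PySem.Int.toStr bb.2 ++ " paraules\n"
  (stat, stat2)

-- ===== PRECONDITION & SPEC =====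
-- Pre_ excludes exactly the inputs on which Python A raises: an empty list (IndexError on
-- list(d.keys())[0]) and any empty-string word (IndexError on key[0]).
def Pre_get_stat_by_prefix (words : List String) : Prop :=
  words ≠ [] ∧ ∀ s ∈ words, s ≠ ""
instance (words : List String) : Decidable (Pre_get_stat_by_prefix words) := by
  unfold Pre_get_stat_by_prefix; infer_instance
def pvWitness_get_stat_by_prefix : List String := ["abc", "abd", "ax", "bcd", "abc"]

def Spec_get_stat_by_prefix (words : List String) (out : String × String) : Prop := out = get_stat_by_prefix_alt words
instance (words : List String) (out : String × String) : Decidable (Spec_get_stat_by_prefix words out) := by unfold Spec_get_stat_by_prefix; infer_instance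

-- ===== CLAIM (what is proved, stated in full; the proofs are below) =====
def Claim_equal_get_stat_by_prefix : Prop := ∀ (words : List String), Dom_get_stat_by_prefix words → Pre_get_stat_by_prefix words → Spec_get_stat_by_prefix words (get_stat_by_prefix words)

-- ===== LEMMAS AND PROOFS =====

-- A's count loop body is the standard counter step.
theorem pv_countFold (xs : List String) :
    xs.foldl (fun (d : PySem.Dict String Int) n =>
      if ¬ (n ∈ d.keys) then d.insert n 1 else d.insert n (d.getD n 0 + 1)) PySem.Dict.empty
    = PySem.Dict.counter xs := by
  rw [PySem.List.foldl_congr_mem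
      (g := fun (d : PySem.Dict String Int) n => d.insert n (d.getD n 0 + 1))]
  · exact PySem.Dict.foldl_insert_getD_add_one_eq_counter xs
  · intro acc n _
    by_cases h : n ∈ acc.keys
    · simp [h]
    · have hc : acc.contains n = false := by
        rw [← Bool.not_eq_true, PySem.Dict.contains_iff_mem_keys]; exact h
      simp [h, PySem.Dict.getD_of_not_contains acc 0 hc]

-- ===== the central lemma: pvRuns of a sorted list is the (distinct key, count) table =====

theorem pv_discard_filter (s : List String) (x : String) :
    PySem.Set.discard s x = s.filter (fun y => !(y == x)) := rfl

theorem pv_ofList_all_eq_append (x : String) (tw dw : List String)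
    (h1 : ∀ y ∈ tw, y = x) (h2 : ∀ y ∈ dw, y ≠ x) :
    PySem.Set.discard (PySem.Set.ofList (tw ++ dw)) x = PySem.Set.ofList dw := by
  induction tw with
  | nil =>
      simp only [List.nil_append, pv_discard_filter]
      apply List.filter_eq_self.mpr
      intro y hy
      have := h2 y ((PySem.Set.mem_ofList dw y).mp hy)
      simp [this]
  | cons a tw ih =>
      have ha : a = x := h1 a (by simp)
      subst ha
      rw [List.cons_append, PySem.Set.ofList_cons, pv_discard_filter, List.filter_cons]
      simp only [beq_self_eq_true, Bool.not_true, Bool.false_eq_true, reduceIte]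
      rw [pv_discard_filter, List.filter_filter]
      have : (fun y => !(y == a) && !(y == a)) = (fun y => !(y == a)) := by
        funext y; cases (y == a) <;> rfl
      rw [this, ← pv_discard_filter]
      exact ih (fun y hy => h1 y (by simp [hy]))

theorem pv_dropWhile_ne (x : String) (t : List String) (htp : t.Pairwise (· ≤ ·))
    (hxle : ∀ y ∈ t, x ≤ y) :
    ∀ y ∈ t.dropWhile (fun y => y == x), y ≠ x := by
  cases hdwE : t.dropWhile (fun y => y == x) with
  | nil => simp
  | cons h r =>
      have hh := List.head?_dropWhile_not (fun y => y == x) t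
      rw [hdwE] at hh
      simp only [List.head?_cons] at hh
      have hhx : h ≠ x := by
        intro e; rw [e] at hh; simp at hh
      have hhmem : h ∈ t := by
        have : h ∈ t.dropWhile (fun y => y == x) := by rw [hdwE]; simp
        exact List.Sublist.mem this (List.dropWhile_sublist _)
      have hhgt : x < h := lt_of_le_of_ne (hxle h hhmem) (Ne.symm hhx)
      have hdwp : (h :: r).Pairwise (· ≤ ·) := by
        rw [← hdwE]
        exact htp.sublist (List.dropWhile_sublist _)
      intro y hy
      rcases List.mem_cons.mp hy with rfl | hyr
      · exact hhx
      · have : h ≤ y := (List.pairwise_cons.mp hdwp).1 y hyr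
        exact fun e => absurd (e ▸ this) (not_le.mpr hhgt)

theorem pv_runs_pairwise (n : Nat) : ∀ (l : List String), l.length ≤ n →
    l.Pairwise (· ≤ ·) →
    pvRuns l = (PySem.Set.ofList l).map (fun k => (k, ((l.count k : Nat) : Int))) := by
  induction n with
  | zero =>
      intro l hl _
      rw [List.length_eq_zero_iff.mp (Nat.le_zero.mp hl)]
      simp [pvRuns]
  | succ n ih =>
      intro l hl hp
      match l with
      | [] => simp [pvRuns]
      | x :: t =>
        have htp : t.Pairwise (· ≤ ·) := hp.of_cons
        have hxle : ∀ y ∈ t, x ≤ y := (List.pairwise_cons.mp hp).1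
        have hsplit : t.takeWhile (fun y => y == x) ++ t.dropWhile (fun y => y == x) = t :=
          List.takeWhile_append_dropWhile
        have htw_eq : ∀ y ∈ t.takeWhile (fun y => y == x), y = x := by
          intro y hy
          exact eq_of_beq (List.mem_takeWhile_imp (p := fun y => y == x) hy)
        have hdw_ne := pv_dropWhile_ne x t htp hxle
        have hdwlen : (t.dropWhile (fun y => y == x)).length ≤ n := by
          have h1 : (t.dropWhile (fun y => y == x)).length ≤ t.length :=
            t.length_dropWhile_le _
          have h2 : t.length ≤ n := Nat.lt_succ_iff.mp (by simpa using hl)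
          exact le_trans h1 h2
        have hdwpw : (t.dropWhile (fun y => y == x)).Pairwise (· ≤ ·) :=
          htp.sublist (List.dropWhile_sublist _)
        have hIH := ih _ hdwlen hdwpw
        -- count facts
        have hcx : (((x :: t).count x : Nat) : Int)
            = 1 + ((t.takeWhile (fun y => y == x)).length : Int) := by
          have ctw : (t.takeWhile (fun y => y == x)).count x
              = (t.takeWhile (fun y => y == x)).length :=
            List.count_eq_length.mpr (fun y hy => ((htw_eq y hy).symm ▸ rfl))
          have cdw : (t.dropWhile (fun y => y == x)).count x = 0 :=
            List.count_eq_zero.mpr (fun h => (hdw_ne x h) rfl)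
          have hct : t.count x = (t.takeWhile (fun y => y == x)).length := by
            conv_lhs => rw [← hsplit]
            rw [List.count_append, ctw, cdw, Nat.add_zero]
          rw [List.count_cons_self, hct]
          push_cast
          ring
        have hck : ∀ k ∈ t.dropWhile (fun y => y == x),
            ((x :: t).count k : Nat) = (t.dropWhile (fun y => y == x)).count k := by
          intro k hk
          have hkx : k ≠ x := hdw_ne k hk
          have ctw : (t.takeWhile (fun y => y == x)).count k = 0 :=
            List.count_eq_zero.mpr (fun h => hkx (htw_eq k h))
          have hct : t.count k = (t.dropWhile (fun y => y == x)).count k := by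
            conv_lhs => rw [← hsplit]
            rw [List.count_append, ctw, Nat.zero_add]
          have hbx : (x == k) = false := beq_eq_false_iff_ne.mpr (Ne.symm hkx)
          simp [List.count_cons, hbx, hct]
        -- ofList (x :: t) = x :: ofList dw
        have hofl : PySem.Set.ofList (x :: t)
            = x :: PySem.Set.ofList (t.dropWhile (fun y => y == x)) := by
          conv_lhs => rw [PySem.Set.ofList_cons, ← hsplit]
          rw [pv_ofList_all_eq_append x _ _ htw_eq hdw_ne]
        rw [pvRuns, hofl, List.map_cons, hIH]
        refine congrArg₂ _ (by rw [← hcx]) ?_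
        apply List.map_congr_left
        intro k hk
        have hkdw := (PySem.Set.mem_ofList _ k).mp hk
        rw [hck k hkdw]

theorem pv_runs_eq (xs : List String) :
    pvRuns (PySem.List.sorted xs (fun x => x))
    = (PySem.Set.ofList (PySem.List.sorted xs (fun x => x))).map
        (fun k => (k, (((PySem.List.sorted xs (fun x => x)).count k : Nat) : Int))) := by
  refine pv_runs_pairwise (PySem.List.sorted xs (fun x => x)).length _ le_rfl ?_
  simpa using PySem.List.sorted_pairwise xs (fun x => x)

-- first-maximum machinery (Python max with key = first extremal element)
def pvMaxStep {α κ : Type} [LT κ] [DecidableLT κ] (key : α → κ) (acc : Option α) (x : α) : Option α :=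
  match acc with
  | none => some x
  | some m => if key m < key x then some x else some m

def pvArg (cnt : String → Int) : List String → String → String
  | [], m => m
  | b :: t, m => if cnt m < cnt b then pvArg cnt t b else pvArg cnt t m

theorem pv_max?_eq {α κ : Type} [LT κ] [DecidableLT κ] (key : α → κ) (L : List α) :
    PySem.List.max? L key = L.foldl (pvMaxStep key) none := rfl

theorem pv_foldl_maxStep (cnt : String → Int) (t : List String) :
    ∀ m, t.foldl (pvMaxStep cnt) (some m) = some (pvArg cnt t m) := by
  induction t with
  | nil => intro m; rfl
  | cons b t ih =>
      intro m
      simp only [List.foldl_cons, pvMaxStep, pvArg]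
      by_cases h : cnt m < cnt b
      · rw [if_pos h, if_pos h, ih]
      · rw [if_neg h, if_neg h, ih]

theorem pv_foldl_vals (cnt : String → Int) (t : List String) :
    ∀ m, (t.map cnt).foldl (pvMaxStep (fun v : Int => v)) (some (cnt m))
      = some (cnt (pvArg cnt t m)) := by
  induction t with
  | nil => intro m; rfl
  | cons b t ih =>
      intro m
      simp only [List.map_cons, List.foldl_cons, pvMaxStep, pvArg]
      by_cases h : cnt m < cnt b
      · rw [if_pos h, if_pos h, ih]
      · rw [if_neg h, if_neg h, ih]

theorem pv_foldl_best (cnt : String → Int) (t : List String) :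
    ∀ m, (t.map (fun k => (k, cnt k))).foldl
        (fun (b : String × Int) kv => if kv.2 > b.2 then (kv.1, kv.2) else b) (m, cnt m)
      = (pvArg cnt t m, cnt (pvArg cnt t m)) := by
  induction t with
  | nil => intro m; rfl
  | cons b t ih =>
      intro m
      simp only [List.map_cons, List.foldl_cons, pvArg, gt_iff_lt]
      by_cases h : cnt m < cnt b
      · rw [if_pos h, if_pos h, ih]
      · rw [if_neg h, if_neg h, ih]

-- "\n***" splits as "\n" ++ "***"
theorem pv_nl : ("\n***" : String) = "\n" ++ "***" := by
  apply String.toList_inj.mp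
  rw [String.toList_append]
  decide

-- the two formatting step functions are pointwise equal
theorem pv_step_eq (sa : String × Char) (kv : String × Int) :
    (if (PySem.Str.pyGet? kv.1 0).getD ' ' = sa.2 then
        (sa.1 ++ "***" ++ kv.1 ++ " -*** " ++ PySem.Int.toStr kv.2 ++ "  ",
         (PySem.Str.pyGet? kv.1 0).getD ' ')
      else
        (sa.1 ++ "\n***" ++ kv.1 ++ " -*** " ++ PySem.Int.toStr kv.2 ++ "  ",
         (PySem.Str.pyGet? kv.1 0).getD ' '))
    = (sa.1 ++ ((if (PySem.Str.pyGet? kv.1 0).getD ' ' = sa.2 then ("" : String) else "\n")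
          ++ "***" ++ kv.1 ++ " -*** " ++ PySem.Int.toStr kv.2 ++ "  "),
       (PySem.Str.pyGet? kv.1 0).getD ' ') := by
  by_cases h : (PySem.Str.pyGet? kv.1 0).getD ' ' = sa.2
  · rw [if_pos h, if_pos h]
    simp [String.append_assoc]
  · rw [if_neg h, if_neg h]
    simp [String.append_assoc, pv_nl]

theorem pv_fst_main (cnt : String → Int) (k : String) (t : List String) :
    (List.foldl
        (fun (sa : String × Char) (kv : String × Int) =>
          if (PySem.Str.pyGet? kv.1 0).getD ' ' = sa.2 then
            (sa.1 ++ "***" ++ kv.1 ++ " -*** " ++ PySem.Int.toStr kv.2 ++ "  ",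
             (PySem.Str.pyGet? kv.1 0).getD ' ')
          else
            (sa.1 ++ "\n***" ++ kv.1 ++ " -*** " ++ PySem.Int.toStr kv.2 ++ "  ",
             (PySem.Str.pyGet? kv.1 0).getD ' '))
        ("", ((PySem.List.pyGet? (k :: t) 0).bind (fun a => PySem.Str.pyGet? a 0)).getD ' ')
        ((k :: t).map (fun k => (k, cnt k)))).1
    = (List.foldl
        (fun (sa : String × Char) (kv : String × Int) =>
          (sa.1 ++ ((if (PySem.Str.pyGet? kv.1 0).getD ' ' = sa.2 then ("" : String) else "\n")
              ++ "***" ++ kv.1 ++ " -*** " ++ PySem.Int.toStr kv.2 ++ "  "),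
           (PySem.Str.pyGet? kv.1 0).getD ' '))
        ("", ((PySem.List.pyGet? ((k :: t).map (fun k => (k, cnt k))) 0).bind
              (fun kv => PySem.Str.pyGet? kv.1 0)).getD ' ')
        ((k :: t).map (fun k => (k, cnt k)))).1 := by
  have h1 : PySem.List.pyGet? (k :: t) (0 : Int) = some k := by
    simp [PySem.List.pyGet?, PySem.List.pyIdx?]
  have h2 : PySem.List.pyGet? ((k :: t).map (fun k => (k, cnt k))) (0 : Int)
      = some (k, cnt k) := by
    simp [PySem.List.pyGet?, PySem.List.pyIdx?]
  rw [h1, h2]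
  refine congrArg _ ?_
  exact PySem.List.foldl_congr_mem _ _ _ _ (fun sa kv _ => pv_step_eq sa kv)

theorem pv_snd_main (cnt : String → Int) (k : String) (t : List String) (hpos : 0 < cnt k) :
    ("\n\n***" ++ (PySem.List.max? (k :: t) cnt).getD "" ++ " -*** " ++
      PySem.Int.toStr
        ((PySem.List.max? (((k :: t).map (fun k => (k, cnt k))).map (fun x => x.2))
            (fun v => v)).getD 0) ++ " paraules\n")
    = ("\n\n***" ++
        (List.foldl (fun (b : String × Int) kv => if kv.2 > b.2 then (kv.1, kv.2) else b)
          (((PySem.List.pyGet? ((k :: t).map (fun k => (k, cnt k))) 0).map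
              (fun kv => kv.1)).getD "", 0)
          ((k :: t).map (fun k => (k, cnt k)))).1 ++ " -*** " ++
      PySem.Int.toStr
        ((List.foldl (fun (b : String × Int) kv => if kv.2 > b.2 then (kv.1, kv.2) else b)
          (((PySem.List.pyGet? ((k :: t).map (fun k => (k, cnt k))) 0).map
              (fun kv => kv.1)).getD "", 0)
          ((k :: t).map (fun k => (k, cnt k)))).2) ++ " paraules\n") := by
  have h2 : PySem.List.pyGet? ((k :: t).map (fun k => (k, cnt k))) (0 : Int)
      = some (k, cnt k) := by
    simp [PySem.List.pyGet?, PySem.List.pyIdx?]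
  have hmk : PySem.List.max? (k :: t) cnt = some (pvArg cnt t k) := by
    rw [pv_max?_eq, List.foldl_cons]
    exact pv_foldl_maxStep cnt t k
  have hmv : PySem.List.max? (((k :: t).map (fun k => (k, cnt k))).map (fun x => x.2))
      (fun v => v) = some (cnt (pvArg cnt t k)) := by
    rw [List.map_map]
    have : ((fun (x : String × Int) => x.2) ∘ (fun k => (k, cnt k))) = cnt := rfl
    rw [this, List.map_cons, pv_max?_eq, List.foldl_cons]
    exact pv_foldl_vals cnt t k
  have hfold : List.foldl (fun (b : String × Int) kv => if kv.2 > b.2 then (kv.1, kv.2) else b)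
      (((PySem.List.pyGet? ((k :: t).map (fun k => (k, cnt k))) 0).map
          (fun kv => kv.1)).getD "", 0)
      ((k :: t).map (fun k => (k, cnt k)))
      = (pvArg cnt t k, cnt (pvArg cnt t k)) := by
    rw [h2]
    simp only [Option.map_some, Option.getD_some, List.map_cons, List.foldl_cons,
      gt_iff_lt]
    rw [if_pos hpos]
    exact pv_foldl_best cnt t k
  rw [hmk, hmv, hfold]
  rfl

-- ===== VERDICT (by name: the statement is the Claim_ definition above) =====
theorem get_stat_by_prefix_spec : Claim_equal_get_stat_by_prefix := by
  intro words _hdom hpre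
  obtain ⟨hne, hnn⟩ := hpre
  show get_stat_by_prefix words = get_stat_by_prefix_alt words
  simp only [get_stat_by_prefix, get_stat_by_prefix_alt]
  rw [PySem.List.foldl_prod_mk
      (f := fun acc e => acc ++ [PySem.Str.slice e (some 0) (some 2)])
      (g := fun acc e => acc ++ [PySem.Str.slice e (some 0) (some 3)])]
  simp only [PySem.List.foldl_append_singleton_eq_map, List.nil_append, pv_countFold]
  simp only [PySem.Dict.keys_counter, PySem.Dict.items_counter, PySem.Dict.getD_counter,
    PySem.Dict.values]
  rw [pv_runs_eq, pv_runs_eq]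
  have hm2 : words.map (fun x => PySem.Str.slice x (some 0) (some 2)) ≠ [] :=
    fun h => hne (List.map_eq_nil_iff.mp h)
  have hm3 : words.map (fun x => PySem.Str.slice x (some 0) (some 3)) ≠ [] :=
    fun h => hne (List.map_eq_nil_iff.mp h)
  have hs2 : PySem.List.sorted (words.map (fun x => PySem.Str.slice x (some 0) (some 2)))
      (fun x => x) ≠ [] := fun h => hm2 ((PySem.List.sorted_eq_nil_iff _ _ _).mp h)
  have hs3 : PySem.List.sorted (words.map (fun x => PySem.Str.slice x (some 0) (some 3)))
      (fun x => x) ≠ [] := fun h => hm3 ((PySem.List.sorted_eq_nil_iff _ _ _).mp h)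
  have hK2 : PySem.Set.ofList (PySem.List.sorted
      (words.map (fun x => PySem.Str.slice x (some 0) (some 2))) (fun x => x)) ≠ [] := by
    obtain ⟨e, r, hE⟩ := List.exists_cons_of_ne_nil hs2
    rw [hE]
    exact List.ne_nil_of_mem ((PySem.Set.mem_ofList _ e).mpr (by simp))
  have hK3 : PySem.Set.ofList (PySem.List.sorted
      (words.map (fun x => PySem.Str.slice x (some 0) (some 3))) (fun x => x)) ≠ [] := by
    obtain ⟨e, r, hE⟩ := List.exists_cons_of_ne_nil hs3
    rw [hE]
    exact List.ne_nil_of_mem ((PySem.Set.mem_ofList _ e).mpr (by simp))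
  obtain ⟨k2, t2, hK2E⟩ := List.exists_cons_of_ne_nil hK2
  obtain ⟨k3, t3, hK3E⟩ := List.exists_cons_of_ne_nil hK3
  have hk3mem : k3 ∈ PySem.List.sorted
      (words.map (fun x => PySem.Str.slice x (some 0) (some 3))) (fun x => x) := by
    refine (PySem.Set.mem_ofList _ k3).mp ?_
    rw [hK3E]; simp
  have hpos : (0 : Int) < ((List.count k3 (PySem.List.sorted
      (words.map (fun x => PySem.Str.slice x (some 0) (some 3))) (fun x => x)) : Nat) : Int) := by
    have := List.count_pos_iff.mpr hk3mem
    exact_mod_cast this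
  rw [hK2E, hK3E]
  exact Prod.ext (pv_fst_main _ k2 t2) (pv_snd_main _ k3 t3 hpos)
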